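-- pv_equiv track=rewrite | github.com/wilmurillo-ai/Design-Assistant | .skills/openclaw-skills/skills/erickong/text-to-image/scripts/render_text_image.py | tokenize_segments
-- ===== SOURCE A (Python) =====
-- from typing import Any, Dict, List, Optional, Tuple
--
-- def tokenize_segments(segments: List[Dict[str, Any]]) -> List[Dict[str, Any]]:
--     tokens: List[Dict[str, Any]] = []
--     for seg in segments:
--         text = seg["text"]
--         color = seg["color"]
--         buffer = ""
--         for char in text:
--             if char == "\n":
--                 if buffer:
--                     tokens.append({"type": "text", "text": buffer, "color": color})
--                     buffer = ""
--                 tokens.append({"type": "newline"})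
--             elif char == " ":
--                 buffer += char
--                 tokens.append({"type": "text", "text": buffer, "color": color})
--                 buffer = ""
--             else:
--                 buffer += char
--         if buffer:
--             tokens.append({"type": "text", "text": buffer, "color": color})
--     return merge_adjacent_tokens(tokens)
--
-- def merge_adjacent_tokens(tokens: List[Dict[str, Any]]) -> List[Dict[str, Any]]:
--     merged: List[Dict[str, Any]] = []
--     for token in tokens:
--         if token["type"] != "text":
--             merged.append(token)
--             continue
--         if (
--             merged
--             and merged[-1]["type"] == "text"
--             and merged[-1]["color"] == token["color"]
--         ):
--             merged[-1]["text"] += token["text"]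
--         else:
--             merged.append(token.copy())
--     return merged
-- ===== SOURCE B (Python) =====
-- # Single streaming pass: one open text token carried across segment boundaries,
-- # replacing A's two-phase tokenize-then-merge-adjacent-tokens.
-- def tokenize_segments(segments):
--     out = []
--     cur = None  # open text run: (text, color), flushed on newline / color change / end
--     for seg in segments:
--         color = seg["color"]
--         text = seg["text"]
--         for ch in text:
--             if ch == "\n":
--                 if cur is not None:
--                     out.append({"type": "text", "text": cur[0], "color": cur[1]})
--                     cur = None
--                 out.append({"type": "newline"})
--             elif cur is not None and cur[1] == color:
--                 cur = (cur[0] + ch, color)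
--             else:
--                 if cur is not None:
--                     out.append({"type": "text", "text": cur[0], "color": cur[1]})
--                 cur = (ch, color)
--     if cur is not None:
--         out.append({"type": "text", "text": cur[0], "color": cur[1]})
--     return out
-- ===== Notes on version B (the rewrite author's own statement) =====
-- stated objective: simpler
-- what changed: Replaced A's two-phase pipeline (per-char tokenizer emitting a token at every space/newline/segment end, then a second merge_adjacent_tokens pass that re-joins adjacent same-color text tokens) with a single streaming pass that keeps one open text run carried across segment boundaries and flushes it only on newline, color change or end of input.
import Mathlib
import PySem

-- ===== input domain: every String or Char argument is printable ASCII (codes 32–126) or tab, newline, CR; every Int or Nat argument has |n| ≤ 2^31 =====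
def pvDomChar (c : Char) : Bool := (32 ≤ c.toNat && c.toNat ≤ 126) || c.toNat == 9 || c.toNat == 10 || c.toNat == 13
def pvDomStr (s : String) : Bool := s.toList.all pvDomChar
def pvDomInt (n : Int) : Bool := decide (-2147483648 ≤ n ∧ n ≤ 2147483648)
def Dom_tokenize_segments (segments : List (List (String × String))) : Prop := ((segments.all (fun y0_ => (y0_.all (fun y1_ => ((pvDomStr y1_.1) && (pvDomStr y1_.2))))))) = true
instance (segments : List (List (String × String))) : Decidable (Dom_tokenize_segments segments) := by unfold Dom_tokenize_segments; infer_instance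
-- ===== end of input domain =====

-- B replaces A's two-phase tokenize-then-merge_adjacent_tokens with one streaming pass
-- carrying a single open text run across segment boundaries (objective: simpler).

-- shared token literals ({"type":"text","text":t,"color":c} and {"type":"newline"})
def pvTextTok (t c : String) : List (String × String) :=
  [("type", "text"), ("text", t), ("color", c)]
def pvNlTok : List (String × String) := [("type", "newline")]

-- ===== PORT A =====
-- loop body of merge_adjacent_tokens; token["k"] is ported as (get? "k").getD ""
-- (exact here: every token reaching merge carries its keys, so no KeyError).
def pvMergeStep (merged : List (List (String × String))) (token : List (String × String)) :
    List (List (String × String)) :=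
  if ((PySem.Dict.mk token).get? "type").getD "" ≠ "text" then merged ++ [token]
  else
    match merged.getLast? with
    | some last =>
      if ((PySem.Dict.mk last).get? "type").getD "" = "text" ∧
         ((PySem.Dict.mk last).get? "color").getD "" = ((PySem.Dict.mk token).get? "color").getD ""
      then merged.dropLast ++
        [((PySem.Dict.mk last).insert "text"
            (((PySem.Dict.mk last).get? "text").getD "" ++ ((PySem.Dict.mk token).get? "text").getD "")).items]
      else merged ++ [token]
    | none => merged ++ [token]

def merge_adjacent_tokens (tokens : List (List (String × String))) : List (List (String × String)) :=
  tokens.foldl pvMergeStep []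

-- the inner 'for char in text' body of A
def pvAStep (color : String) (st : List (List (String × String)) × String) (char : Char) :
    List (List (String × String)) × String :=
  if char = '\n' then
    ((if st.2 ≠ "" then st.1 ++ [pvTextTok st.2 color] else st.1) ++ [pvNlTok], "")
  else if char = ' ' then
    (st.1 ++ [pvTextTok (st.2.push char) color], "")
  else (st.1, st.2.push char)

-- A's trailing 'if buffer: tokens.append(...)' after the char loop
def pvAFinish (color : String) (st : List (List (String × String)) × String) :
    List (List (String × String)) :=
  if st.2 ≠ "" then st.1 ++ [pvTextTok st.2 color] else st.1

-- one iteration of A's 'for seg in segments'; seg["text"] / seg["color"] are ported as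
-- (get? …).getD "" — exact on Pre_ (both keys present; a missing key is Python's KeyError).
def pvASeg (tokens : List (List (String × String))) (seg : List (String × String)) :
    List (List (String × String)) :=
  pvAFinish (((PySem.Dict.mk seg).get? "color").getD "")
    ((((PySem.Dict.mk seg).get? "text").getD "").toList.foldl
      (pvAStep (((PySem.Dict.mk seg).get? "color").getD "")) (tokens, ""))

def tokenize_segments (segments : List (List (String × String))) : List (List (String × String)) :=
  merge_adjacent_tokens (segments.foldl pvASeg [])

-- ===== PORT B =====
-- flush the open run (B's 'if cur is not None: out.append(...)')
def pvFlush (out : List (List (String × String))) (cur : Option (String × String)) :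
    List (List (String × String)) :=
  match cur with
  | none => out
  | some (t, c) => out ++ [pvTextTok t c]

-- B's 'for ch in text' body
def pvBStep (color : String) (st : List (List (String × String)) × Option (String × String))
    (ch : Char) : List (List (String × String)) × Option (String × String) :=
  if ch = '\n' then (pvFlush st.1 st.2 ++ [pvNlTok], none)
  else
    match st.2 with
    | some (t, c) =>
      if c = color then (st.1, some (t.push ch, c))
      else (st.1 ++ [pvTextTok t c], some (String.singleton ch, color))
    | none => (st.1, some (String.singleton ch, color))

-- B's 'for seg in segments' body (same getD-"" reading of seg's keys as in port A)
def pvBSeg (st : List (List (String × String)) × Option (String × String))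
    (seg : List (String × String)) : List (List (String × String)) × Option (String × String) :=
  (((PySem.Dict.mk seg).get? "text").getD "").toList.foldl
    (pvBStep (((PySem.Dict.mk seg).get? "color").getD "")) st

def tokenize_segments_alt (segments : List (List (String × String))) :
    List (List (String × String)) :=
  pvFlush (segments.foldl pvBSeg ([], none)).1 (segments.foldl pvBSeg ([], none)).2

-- ===== PRECONDITION & SPEC =====
-- Pre_ excludes exactly the segments missing a "text" or "color" key, on which
-- Python A raises KeyError (B raises there too).
def Pre_tokenize_segments (segments : List (List (String × String))) : Prop :=
  ∀ seg ∈ segments, (PySem.Dict.mk seg).contains "text" = true ∧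
    (PySem.Dict.mk seg).contains "color" = true
instance (segments : List (List (String × String))) : Decidable (Pre_tokenize_segments segments) := by
  unfold Pre_tokenize_segments; infer_instance

def pvWitness_tokenize_segments : (List (List (String × String))) :=
  [[("text", "a b\nc"), ("color", "red")], [("text", "d e"), ("color", "red")]]

def Spec_tokenize_segments (segments : List (List (String × String))) (out : List (List (String × String))) : Prop := out = tokenize_segments_alt segments
instance (segments : List (List (String × String))) (out : List (List (String × String))) : Decidable (Spec_tokenize_segments segments out) := by unfold Spec_tokenize_segments; infer_instance

-- ===== CLAIM (what is proved, stated in full; the proofs are below) =====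
def Claim_equal_tokenize_segments : Prop := ∀ (segments : List (List (String × String))), Dom_tokenize_segments segments → Pre_tokenize_segments segments → Spec_tokenize_segments segments (tokenize_segments segments)

-- ===== LEMMAS AND PROOFS =====

-- the last element of `out` is not a text token
def pvLastNotText (out : List (List (String × String))) : Prop :=
  ∀ l ∈ out.getLast?, ((PySem.Dict.mk l).get? "type").getD "" ≠ "text"

-- the last element of `out` is not a text token of color c
def pvLastNotTextColor (out : List (List (String × String))) (c : String) : Prop :=
  ∀ l ∈ out.getLast?, ¬(((PySem.Dict.mk l).get? "type").getD "" = "text" ∧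
      ((PySem.Dict.mk l).get? "color").getD "" = c)

-- invariant between segments: M is the merged prefix A has produced, st is B's state
def pvInv (M : List (List (String × String)))
    (st : List (List (String × String)) × Option (String × String)) : Prop :=
  match st.2 with
  | none => M = st.1 ∧ pvLastNotText st.1
  | some (t, c) => t ≠ "" ∧ M = st.1 ++ [pvTextTok t c] ∧ pvLastNotTextColor st.1 c

-- invariant inside a segment: buf is A's pending buffer, a suffix of B's open run
def pvInvC (color : String) (M : List (List (String × String))) (buf : String)
    (st : List (List (String × String)) × Option (String × String)) : Prop :=
  match st.2 with
  | none => buf = "" ∧ M = st.1 ∧ pvLastNotText st.1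
  | some (t, c) => ∃ s, t = s ++ buf ∧ pvLastNotTextColor st.1 c ∧ (buf ≠ "" → c = color) ∧
      ((s = "" ∧ M = st.1 ∧ buf ≠ "") ∨ (s ≠ "" ∧ M = st.1 ++ [pvTextTok s c]))

-- lookups on the two token shapes
@[simp] lemma pvGet_textTok_type (t c : String) :
    (PySem.Dict.mk (pvTextTok t c)).get? "type" = some "text" := by
  simp [pvTextTok, PySem.Dict.get?_mk_cons]

@[simp] lemma pvGet_textTok_text (t c : String) :
    (PySem.Dict.mk (pvTextTok t c)).get? "text" = some t := by
  simp [pvTextTok, PySem.Dict.get?_mk_cons]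

@[simp] lemma pvGet_textTok_color (t c : String) :
    (PySem.Dict.mk (pvTextTok t c)).get? "color" = some c := by
  simp [pvTextTok, PySem.Dict.get?_mk_cons]

@[simp] lemma pvGet_nlTok_type :
    (PySem.Dict.mk pvNlTok).get? "type" = some "newline" := by
  simp [pvNlTok, PySem.Dict.get?_mk_cons]

@[simp] lemma pvInsert_textTok_text (t c v : String) :
    ((PySem.Dict.mk (pvTextTok t c)).insert "text" v).items = pvTextTok v c := by
  simp [pvTextTok, PySem.Dict.insert, PySem.Dict.contains]

lemma pvPush_empty (c : Char) : ("" : String).push c = String.singleton c := rfl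

lemma pvAppend_push (s t : String) (c : Char) : s ++ t.push c = (s ++ t).push c := by
  rw [← String.append_singleton, ← String.append_singleton, String.append_assoc]

-- tokens appended and new buffer of one pvAStep
def pvADelta (color : String) (buf : String) (ch : Char) :
    List (List (String × String)) × String :=
  if ch = '\n' then ((if buf ≠ "" then [pvTextTok buf color] else []) ++ [pvNlTok], "")
  else if ch = ' ' then ([pvTextTok (buf.push ch) color], "")
  else ([], buf.push ch)

lemma pvAStep_eq (color : String) (toks : List (List (String × String))) (buf : String)
    (ch : Char) : pvAStep color (toks, buf) ch =
      (toks ++ (pvADelta color buf ch).1, (pvADelta color buf ch).2) := by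
  simp only [pvAStep, pvADelta]
  split_ifs <;> simp

lemma pvADelta_ch (color : String) (buf : String) (ch : Char) (h1 : ch ≠ '\n')
    (h2 : ch ≠ ' ') : pvADelta color buf ch = ([], buf.push ch) := by
  simp [pvADelta, h1, h2]

lemma pvBStep_none (color : String) (out : List (List (String × String))) (ch : Char)
    (h : ch ≠ '\n') : pvBStep color (out, none) ch = (out, some (String.singleton ch, color)) := by
  simp [pvBStep, h]

lemma pvBStep_some_eq (color : String) (out : List (List (String × String))) (t : String)
    (ch : Char) (h : ch ≠ '\n') :
    pvBStep color (out, some (t, color)) ch = (out, some (t.push ch, color)) := by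
  simp [pvBStep, h]

lemma pvBStep_some_ne (color : String) (out : List (List (String × String))) (t c : String)
    (ch : Char) (h : ch ≠ '\n') (hc : c ≠ color) :
    pvBStep color (out, some (t, c)) ch =
      (out ++ [pvTextTok t c], some (String.singleton ch, color)) := by
  simp [pvBStep, h, hc]

lemma pvAfold_shift (color : String) (cs : List Char) :
    ∀ (toks : List (List (String × String))) (buf : String),
      cs.foldl (pvAStep color) (toks, buf) =
        (toks ++ (cs.foldl (pvAStep color) ([], buf)).1, (cs.foldl (pvAStep color) ([], buf)).2) := by
  induction cs with
  | nil => intro toks buf; simp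
  | cons c cs ih =>
    intro toks buf
    simp only [List.foldl_cons, pvAStep_eq, List.nil_append]
    rw [ih (toks ++ (pvADelta color buf c).1) (pvADelta color buf c).2,
        ih (pvADelta color buf c).1 (pvADelta color buf c).2]
    simp [List.append_assoc]

-- pvMergeStep on the two token shapes
lemma pvMergeStep_nl (M : List (List (String × String))) :
    pvMergeStep M pvNlTok = M ++ [pvNlTok] := by
  simp [pvMergeStep]

lemma pvMergeStep_text_append (M : List (List (String × String))) (u col : String)
    (h : pvLastNotTextColor M col) :
    pvMergeStep M (pvTextTok u col) = M ++ [pvTextTok u col] := by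
  cases hM : M.getLast? with
  | none => simp [pvMergeStep, hM]
  | some l =>
    have hcond := h l (by simp [hM])
    simp [pvMergeStep, hM, hcond]

lemma pvMergeStep_text_merge (out : List (List (String × String))) (s u c : String) :
    pvMergeStep (out ++ [pvTextTok s c]) (pvTextTok u c) = out ++ [pvTextTok (s ++ u) c] := by
  simp [pvMergeStep]

lemma pvLastNotText_nl (out : List (List (String × String))) :
    pvLastNotText (out ++ [pvNlTok]) := by
  intro l hl
  simp only [List.getLast?_append, List.getLast?_singleton, Option.some_or, Option.mem_def,
    Option.some_inj] at hl
  subst hl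
  simp

lemma pvLastNotTextColor_of_ne (out : List (List (String × String))) (t c col : String)
    (hne : c ≠ col) : pvLastNotTextColor (out ++ [pvTextTok t c]) col := by
  intro l hl
  simp only [List.getLast?_append, List.getLast?_singleton, Option.some_or, Option.mem_def,
    Option.some_inj] at hl
  subst hl
  simp [hne]

lemma pvLastNotTextColor_of_notText (out : List (List (String × String))) (col : String)
    (h : pvLastNotText out) : pvLastNotTextColor out col :=
  fun l hl hc => h l hl hc.1

lemma pvSingleton_ne_empty (c : Char) : String.singleton c ≠ "" := by
  rw [← pvPush_empty]; simp

-- one character preserves the inner invariant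
lemma pvStep_preserve (color : String) (M : List (List (String × String))) (buf : String)
    (st : List (List (String × String)) × Option (String × String)) (ch : Char)
    (h : pvInvC color M buf st) :
    pvInvC color ((pvADelta color buf ch).1.foldl pvMergeStep M) (pvADelta color buf ch).2
      (pvBStep color st ch) := by
  obtain ⟨out, cur⟩ := st
  by_cases hnl : ch = '\n'
  · -- newline: both sides close the open run and emit a newline token
    subst hnl
    have hB : pvBStep color (out, cur) '\n' = (pvFlush out cur ++ [pvNlTok], none) := rfl
    rw [hB]
    show pvInvC color _ "" _
    refine ⟨rfl, ?_, pvLastNotText_nl _⟩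
    show ((if buf ≠ "" then [pvTextTok buf color] else []) ++ [pvNlTok]).foldl pvMergeStep M =
      pvFlush out cur ++ [pvNlTok]
    cases cur with
    | none =>
      obtain ⟨hb, hM, hlast⟩ := h
      rw [if_neg (by simpa using hb), hM]
      simp [pvMergeStep_nl, pvFlush]
    | some tc =>
      obtain ⟨t, c⟩ := tc
      obtain ⟨s, hts, hlast, hcol, hcase⟩ := h
      by_cases hbuf : buf = ""
      · rw [if_neg (by simpa using hbuf)]
        rcases hcase with ⟨-, -, hb⟩ | ⟨hs, hM⟩
        · exact absurd hbuf hb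
        · rw [hM]
          have ht : t = s := by rw [hts, hbuf, String.append_empty]
          simp [pvMergeStep_nl, pvFlush, ht]
      · rw [if_pos (by simpa using hbuf)]
        have hc : c = color := hcol hbuf
        rcases hcase with ⟨hs, hM, -⟩ | ⟨hs, hM⟩
        · rw [hM]
          have ht : t = buf := by rw [hts, hs, String.empty_append]
          simp [List.foldl_cons, pvMergeStep_text_append out buf color
            (hc ▸ hlast), pvMergeStep_nl, pvFlush, ht, hc]
        · subst hc
          rw [hM]
          simp [List.foldl_cons, pvMergeStep_text_merge out s buf c,
            pvMergeStep_nl, pvFlush, hts]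
  · by_cases hsp : ch = ' '
    · -- space: A closes buffer+' ' into a token; merge glues it onto the open run
      subst hsp
      have hΔ : pvADelta color buf ' ' = ([pvTextTok (buf.push ' ') color], "") := rfl
      rw [hΔ]
      cases cur with
      | none =>
        obtain ⟨hb, hM, hlast⟩ := h
        rw [pvBStep_none color out ' ' (by decide), hM]
        refine ⟨String.singleton ' ', by simp, pvLastNotTextColor_of_notText out color hlast,
          by simp, Or.inr ⟨pvSingleton_ne_empty ' ', ?_⟩⟩
        simp [List.foldl_cons,
          pvMergeStep_text_append out _ color (pvLastNotTextColor_of_notText out color hlast),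
          hb, pvPush_empty]
      | some tc =>
        obtain ⟨t, c⟩ := tc
        obtain ⟨s, hts, hlast, hcol, hcase⟩ := h
        by_cases hc : c = color
        · subst hc
          rw [pvBStep_some_eq c out t ' ' (by decide)]
          refine ⟨t.push ' ', by simp [String.append_empty], hlast, by simp,
            Or.inr ⟨by simp, ?_⟩⟩
          rcases hcase with ⟨hs, hM, hb⟩ | ⟨hs, hM⟩
          · rw [hM]
            have ht : t = buf := by rw [hts, hs, String.empty_append]
            simp [List.foldl_cons, pvMergeStep_text_append out _ c hlast, ht]
          · rw [hM]
            have : s ++ buf.push ' ' = t.push ' ' := by rw [pvAppend_push, hts]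
            simp [List.foldl_cons, pvMergeStep_text_merge out s (buf.push ' ') c, this]
        · -- color change at a space: flush the old run, open a fresh " " run
          have hbuf : buf = "" := by by_contra hb; exact hc (hcol hb)
          have ht : t = s := by rw [hts, hbuf, String.append_empty]
          rcases hcase with ⟨-, -, hb⟩ | ⟨hs, hM⟩
          · exact absurd hbuf hb
          · rw [pvBStep_some_ne color out t c ' ' (by decide) hc, hM, ht]
            refine ⟨String.singleton ' ', by simp,
              pvLastNotTextColor_of_ne out s c color hc, by simp,
              Or.inr ⟨pvSingleton_ne_empty ' ', ?_⟩⟩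
            simp [List.foldl_cons, hbuf, pvPush_empty,
              pvMergeStep_text_append _ _ color (pvLastNotTextColor_of_ne out s c color hc)]
    · -- ordinary character: A only grows its buffer; merge state is untouched
      rw [pvADelta_ch color buf ch hnl hsp]
      simp only [List.foldl_nil]
      cases cur with
      | none =>
        obtain ⟨hb, hM, hlast⟩ := h
        rw [pvBStep_none color out ch hnl]
        exact ⟨"", by simp [hb, pvPush_empty], pvLastNotTextColor_of_notText out color hlast,
          fun _ => rfl, Or.inl ⟨rfl, hM, by simp⟩⟩
      | some tc =>
        obtain ⟨t, c⟩ := tc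
        obtain ⟨s, hts, hlast, hcol, hcase⟩ := h
        by_cases hc : c = color
        · subst hc
          rw [pvBStep_some_eq c out t ch hnl]
          refine ⟨s, by rw [hts, pvAppend_push], hlast, fun _ => rfl, ?_⟩
          rcases hcase with ⟨hs, hM, -⟩ | ⟨hs, hM⟩
          · exact Or.inl ⟨hs, hM, by simp⟩
          · exact Or.inr ⟨hs, hM⟩
        · have hbuf : buf = "" := by by_contra hb; exact hc (hcol hb)
          have ht : t = s := by rw [hts, hbuf, String.append_empty]
          rcases hcase with ⟨-, -, hb⟩ | ⟨hs, hM⟩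
          · exact absurd hbuf hb
          · rw [pvBStep_some_ne color out t c ch hnl hc, hM, ht]
            exact ⟨"", by simp [hbuf, pvPush_empty],
              pvLastNotTextColor_of_ne out s c color hc, fun _ => rfl,
              Or.inl ⟨rfl, rfl, by simp⟩⟩

-- the inner fold preserves the invariant
lemma pvInner (color : String) (cs : List Char) :
    ∀ (M : List (List (String × String))) (buf : String)
      (st : List (List (String × String)) × Option (String × String)),
      pvInvC color M buf st →
      pvInvC color ((cs.foldl (pvAStep color) ([], buf)).1.foldl pvMergeStep M)
        (cs.foldl (pvAStep color) ([], buf)).2 (cs.foldl (pvBStep color) st) := by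
  induction cs with
  | nil => intro M buf st h; simpa using h
  | cons c cs ih =>
    intro M buf st h
    simp only [List.foldl_cons, pvAStep_eq, List.nil_append]
    rw [pvAfold_shift]
    simp only [List.foldl_append]
    exact ih _ _ _ (pvStep_preserve color M buf st c h)

-- entering a segment: the between-segments invariant is the buf = "" inner invariant
lemma pvInv_to_invC (color : String) (M : List (List (String × String)))
    (st : List (List (String × String)) × Option (String × String)) (h : pvInv M st) :
    pvInvC color M "" st := by
  obtain ⟨out, cur⟩ := st
  cases cur with
  | none => exact ⟨rfl, h.1, h.2⟩
  | some tc =>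
    obtain ⟨t, c⟩ := tc
    obtain ⟨ht, hM, hlast⟩ := h
    exact ⟨t, by simp, hlast, by simp, Or.inr ⟨ht, hM⟩⟩

-- leaving a segment: A flushes its buffer, restoring the between-segments invariant
lemma pvInvC_flush (color : String) (M : List (List (String × String))) (buf : String)
    (st : List (List (String × String)) × Option (String × String))
    (h : pvInvC color M buf st) :
    pvInv ((if buf ≠ "" then [pvTextTok buf color] else []).foldl pvMergeStep M) st := by
  obtain ⟨out, cur⟩ := st
  cases cur with
  | none =>
    obtain ⟨hb, hM, hlast⟩ := h
    rw [if_neg (by simpa using hb)]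
    exact ⟨hM, hlast⟩
  | some tc =>
    obtain ⟨t, c⟩ := tc
    obtain ⟨s, hts, hlast, hcol, hcase⟩ := h
    by_cases hbuf : buf = ""
    · rw [if_neg (by simpa using hbuf)]
      rcases hcase with ⟨-, -, hb⟩ | ⟨hs, hM⟩
      · exact absurd hbuf hb
      · have ht : t = s := by rw [hts, hbuf, String.append_empty]
        exact ⟨ht ▸ hs, by simpa [ht] using hM, hlast⟩
    · rw [if_pos (by simpa using hbuf)]
      have hc : c = color := hcol hbuf
      have htne : t ≠ "" := by
        rw [hts]
        simp [String.append_eq_empty_iff, hbuf]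
      rcases hcase with ⟨hs, hM, -⟩ | ⟨hs, hM⟩
      · have ht : t = buf := by rw [hts, hs, String.empty_append]
        refine ⟨htne, ?_, hlast⟩
        rw [hM]
        simp [List.foldl_cons, pvMergeStep_text_append out buf color (hc ▸ hlast), ht, hc]
      · subst hc
        refine ⟨htne, ?_, hlast⟩
        rw [hM]
        simp [List.foldl_cons, pvMergeStep_text_merge out s buf c, hts]

lemma pvAFinish_eq (color : String) (p : List (List (String × String)) × String) :
    pvAFinish color p = p.1 ++ (if p.2 ≠ "" then [pvTextTok p.2 color] else []) := by
  unfold pvAFinish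
  split_ifs <;> simp

-- one segment preserves the between-segments invariant
lemma pvSeg_preserve (M : List (List (String × String)))
    (st : List (List (String × String)) × Option (String × String))
    (seg : List (String × String)) (h : pvInv M st) :
    pvInv ((pvASeg [] seg).foldl pvMergeStep M) (pvBSeg st seg) := by
  unfold pvASeg pvBSeg
  rw [pvAFinish_eq, List.foldl_append]
  exact pvInvC_flush _ _ _ _ (pvInner _ _ _ _ _ (pvInv_to_invC _ _ _ h))

lemma pvASeg_shift (toks : List (List (String × String))) (seg : List (String × String)) :
    pvASeg toks seg = toks ++ pvASeg [] seg := by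
  unfold pvASeg
  rw [pvAfold_shift, pvAFinish_eq, pvAFinish_eq]
  simp [List.append_assoc]

lemma pvTokens_eq (segments : List (List (String × String))) :
    ∀ toks, segments.foldl pvASeg toks = toks ++ segments.flatMap (pvASeg []) := by
  induction segments with
  | nil => intro toks; simp
  | cons seg segs ih =>
    intro toks
    simp only [List.foldl_cons, List.flatMap_cons]
    rw [pvASeg_shift, ih, List.append_assoc]

lemma pvOuter (segments : List (List (String × String))) :
    ∀ (M : List (List (String × String)))
      (st : List (List (String × String)) × Option (String × String)),
      pvInv M st →
      pvInv ((segments.flatMap (pvASeg [])).foldl pvMergeStep M) (segments.foldl pvBSeg st) := by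
  induction segments with
  | nil => intro M st h; simpa using h
  | cons seg segs ih =>
    intro M st h
    simp only [List.flatMap_cons, List.foldl_append, List.foldl_cons]
    exact ih _ _ (pvSeg_preserve M st seg h)

lemma pvInv_flush_eq (M : List (List (String × String)))
    (st : List (List (String × String)) × Option (String × String)) (h : pvInv M st) :
    M = pvFlush st.1 st.2 := by
  obtain ⟨out, cur⟩ := st
  cases cur with
  | none => exact h.1
  | some tc => obtain ⟨t, c⟩ := tc; exact h.2.1

-- ===== VERDICT (by name: the statement is the Claim_ definition above) =====
theorem tokenize_segments_spec : Claim_equal_tokenize_segments := by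
  intro segments _ _
  unfold Spec_tokenize_segments tokenize_segments tokenize_segments_alt merge_adjacent_tokens
  rw [pvTokens_eq segments []]
  simp only [List.nil_append]
  exact pvInv_flush_eq _ _ (pvOuter segments [] ([], none) ⟨rfl, by simp [pvLastNotText]⟩)
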